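-- pv_equiv track=rewrite | github.com/Darryl-Chamberlain-Jr/CoI_Python_Database_Analysis | Direct_Measures/Python_Scripts/For_GUI_deidentification/deidentify.py | detect_trash_date
-- ===== SOURCE A (Python) =====
-- def detect_trash_date(string): # Detect trash date
--     months=["Jan", "Feb", "Mar", "Apr", "May", "Jun", "Jul", "Aug", "Sep", "Oct", "Nov", "Dec"]
--     years=["2021", "2022", "2023"]
--     for month in months:
--         for year in years:
--             if month in string and year in string:
--                 string=""
--                 break
--     return string
-- ===== SOURCE B (Python) =====
-- def detect_trash_date(string):  # Blank the string iff it mentions a month abbreviation and a recent year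
--     months = ["Jan", "Feb", "Mar", "Apr", "May", "Jun", "Jul", "Aug", "Sep", "Oct", "Nov", "Dec"]
--     years = ["2021", "2022", "2023"]
--     has_month = any(m in string for m in months)
--     has_year = any(y in string for y in years)
--     return "" if has_month and has_year else string
-- ===== Notes on version B (the rewrite author's own statement) =====
-- stated objective: simpler
-- what changed: Replaces the 12x3 nested loop that tests month and year together (with in-place blanking and an inner break) by two independent any() membership scans combined with a single boolean AND.
import Mathlib
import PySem

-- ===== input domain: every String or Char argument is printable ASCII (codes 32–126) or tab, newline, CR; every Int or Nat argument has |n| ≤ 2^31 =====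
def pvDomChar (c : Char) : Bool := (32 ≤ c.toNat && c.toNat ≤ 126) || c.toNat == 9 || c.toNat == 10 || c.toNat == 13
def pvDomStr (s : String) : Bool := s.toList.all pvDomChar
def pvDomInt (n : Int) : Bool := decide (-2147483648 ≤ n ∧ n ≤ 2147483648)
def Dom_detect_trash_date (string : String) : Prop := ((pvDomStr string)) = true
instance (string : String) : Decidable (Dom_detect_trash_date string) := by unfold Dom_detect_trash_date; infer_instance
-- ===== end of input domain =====

-- B replaces A's 12x3 nested loop (blank-and-break) by two independent any-scans joined by a boolean AND: simpler.


-- ===== PORT A =====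
def pvMonthsA : List String := ["Jan", "Feb", "Mar", "Apr", "May", "Jun", "Jul", "Aug", "Sep", "Oct", "Nov", "Dec"]
def pvYearsA : List String := ["2021", "2022", "2023"]

-- inner 'for year in years' loop: on a hit set string = "" and break
def pvYearLoop (month : String) (s : String) : List String → String
  | [] => s
  | y :: rest =>
      if PySem.Str.isIn month s && PySem.Str.isIn y s then ""
      else pvYearLoop month s rest

def detect_trash_date (string : String) : String :=
  pvMonthsA.foldl (fun s month => pvYearLoop month s pvYearsA) string

-- ===== PORT B =====
def detect_trash_date_alt (string : String) : String :=
  let has_month := ["Jan", "Feb", "Mar", "Apr", "May", "Jun",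
                    "Jul", "Aug", "Sep", "Oct", "Nov", "Dec"].any (fun m => PySem.Str.isIn m string)
  let has_year := ["2021", "2022", "2023"].any (fun y => PySem.Str.isIn y string)
  if has_month && has_year then "" else string

-- ===== PRECONDITION & SPEC =====
def Spec_detect_trash_date (string : String) (out : String) : Prop := out = detect_trash_date_alt string
instance (string : String) (out : String) : Decidable (Spec_detect_trash_date string out) := by unfold Spec_detect_trash_date; infer_instance

-- ===== CLAIM (what is proved, stated in full; the proofs are below) =====
def Claim_equal_detect_trash_date : Prop := ∀ (string : String), Dom_detect_trash_date string → Spec_detect_trash_date string (detect_trash_date string)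

-- ===== LEMMAS AND PROOFS =====

-- once the string is "", the inner loop leaves it "" (no 4-char year is a substring of "")
theorem pvYearLoop_empty (month : String) : pvYearLoop month "" pvYearsA = "" := by
  have h1 : PySem.Str.isIn "2021" "" = false := by decide
  have h2 : PySem.Str.isIn "2022" "" = false := by decide
  have h3 : PySem.Str.isIn "2023" "" = false := by decide
  simp only [pvYearsA, pvYearLoop, h1, h2, h3, Bool.and_false, Bool.false_eq_true, if_false]

theorem pvFold_empty (ms : List String) :
    ms.foldl (fun s month => pvYearLoop month s pvYearsA) "" = "" := by
  induction ms with
  | nil => rfl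
  | cons m rest ih => rw [List.foldl_cons, pvYearLoop_empty]; exact ih

-- characterise one outer iteration
theorem pvYearLoop_eq (month s : String) :
    pvYearLoop month s pvYearsA =
      if PySem.Str.isIn month s && pvYearsA.any (fun y => PySem.Str.isIn y s) then "" else s := by
  cases hm : PySem.Str.isIn month s with
  | false =>
    simp only [pvYearsA, pvYearLoop, hm, Bool.false_and, Bool.false_eq_true, if_false]
  | true =>
    cases h1 : PySem.Str.isIn "2021" s <;>
    cases h2 : PySem.Str.isIn "2022" s <;>
    cases h3 : PySem.Str.isIn "2023" s <;>
    simp only [pvYearsA, pvYearLoop, List.any_cons, List.any_nil, hm, h1, h2, h3,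
      Bool.true_and, Bool.false_and, Bool.and_false, Bool.and_true, Bool.or_false,
      Bool.false_or, Bool.true_or, Bool.or_true, Bool.false_eq_true, if_false, if_true]

-- the whole fold equals B's two-scan formulation
theorem pvFold_eq (ms : List String) (s : String) :
    ms.foldl (fun s month => pvYearLoop month s pvYearsA) s =
      if ms.any (fun m => PySem.Str.isIn m s) && pvYearsA.any (fun y => PySem.Str.isIn y s)
      then "" else s := by
  induction ms generalizing s with
  | nil => simp only [List.foldl_nil, List.any_nil, Bool.false_and, Bool.false_eq_true, if_false]
  | cons m rest ih =>
    rw [List.foldl_cons, pvYearLoop_eq, List.any_cons]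
    cases hm : PySem.Str.isIn m s with
    | true =>
      cases hy : pvYearsA.any (fun y => PySem.Str.isIn y s) with
      | true =>
        simp only [Bool.true_and, Bool.true_or, if_true, pvFold_empty]
      | false =>
        simp only [hy, Bool.and_false, Bool.false_eq_true, if_false, ih s]
    | false =>
      simp only [Bool.false_and, Bool.false_eq_true, if_false, Bool.false_or, ih s]

-- ===== VERDICT (by name: the statement is the Claim_ definition above) =====
theorem detect_trash_date_spec : Claim_equal_detect_trash_date := by
  intro s _
  show detect_trash_date s = detect_trash_date_alt s
  rw [detect_trash_date, pvFold_eq, detect_trash_date_alt]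
  rfl
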